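-- pv_equiv track=rewrite | github.com/dyq0811/AnimalGuessingGame | productionrules.py | backward_chain
-- ===== SOURCE A (Python) =====
-- def backward_chain(beliefs, rules, goal):
--     """
--     Return True if the given goal (a string) can be proven
--     with the given beliefs and rules, else return False.
--     """
--     if goal == "" or goal in beliefs:
--         return True
--     new_goals = []
--     new_rules = rules.copy()
--
--     for rule in rules:
--         if rule[1] == goal:
--             new_goals.append(rule[0])
--             new_rules.remove(rule)
--
--     for new_goal in new_goals:
--         if backward_chain(beliefs, new_rules, new_goal):
--             return True
--     return False
-- ===== SOURCE B (Python) =====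
-- def backward_chain(beliefs, rules, goal):
--     """
--     Return True if the given goal (a string) can be proven
--     with the given beliefs and rules, else return False.
--
--     Forward chaining: saturate the set of provable facts bottom-up
--     (len(rules) rounds suffice, since a minimal proof chain never
--     uses a rule twice), then test the goal against that set.
--     """
--     known = set(beliefs)
--     for _ in range(len(rules)):
--         for antecedent, consequent in rules:
--             if antecedent == "" or antecedent in known:
--                 known.add(consequent)
--     return goal == "" or goal in known
-- ===== Notes on version B (the rewrite author's own statement) =====
-- stated objective: alternative
-- what changed: Replaces A's backward-chaining recursion (which re-scans and copies the rule list at every level and can revisit the same subgoal exponentially often) by bottom-up forward chaining: saturate the set of provable facts in len(rules) passes over the rules, then test the goal by membership.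
import Mathlib
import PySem

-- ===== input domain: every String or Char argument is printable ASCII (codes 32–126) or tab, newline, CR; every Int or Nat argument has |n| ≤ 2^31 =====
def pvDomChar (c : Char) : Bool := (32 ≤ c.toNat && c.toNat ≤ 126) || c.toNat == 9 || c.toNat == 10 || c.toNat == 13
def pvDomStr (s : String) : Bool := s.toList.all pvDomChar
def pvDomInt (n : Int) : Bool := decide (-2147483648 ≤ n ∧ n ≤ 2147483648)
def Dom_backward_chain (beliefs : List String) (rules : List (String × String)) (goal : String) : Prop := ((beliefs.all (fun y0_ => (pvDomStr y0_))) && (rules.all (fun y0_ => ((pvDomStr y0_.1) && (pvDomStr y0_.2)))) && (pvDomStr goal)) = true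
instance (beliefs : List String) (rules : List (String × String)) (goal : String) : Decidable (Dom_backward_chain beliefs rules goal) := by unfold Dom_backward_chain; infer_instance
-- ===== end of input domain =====

-- B replaces A's backward-chaining recursion by bottom-up forward chaining (saturate
-- the provable facts in len(rules) passes, then test the goal): a genuinely different
-- algorithm of the same exact behaviour.

-- ===== PORT A =====
-- the body of A's first for-loop: append rule[0] to new_goals, remove rule from new_rules
def bcStep (goal : String) (st : List String × List (String × String)) (r : String × String) :
    List String × List (String × String) :=
  if r.2 = goal then (st.1 ++ [r.1], (PySem.List.remove? st.2 r).getD st.2) else st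
  -- remove? is never none here (each matching rule is still present when visited);
  -- .getD is only a type-level default

-- A's first for-loop: fold over rules with state (new_goals, new_rules), new_rules starting as a copy of rules
def bcScan (goal : String) (rules : List (String × String)) :
    List String × List (String × String) :=
  rules.foldl (bcStep goal) ([], rules)

-- characterisation of the scan, needed by the port's termination proof
theorem pv_remove?_append_self {α : Type} [BEq α] [LawfulBEq α]
    (fp tl : List α) (r : α) (h : r ∉ fp) :
    PySem.List.remove? (fp ++ r :: tl) r = some (fp ++ tl) := by
  induction fp with
  | nil => simp [PySem.List.remove?_cons_self]
  | cons x fp ih =>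
      have hx : x ≠ r := by intro he; exact h (by simp [he])
      have := ih (fun hm => h (List.mem_cons_of_mem _ hm))
      simp only [List.cons_append]
      rw [PySem.List.remove?_cons_of_ne _ hx, this]
      rfl

theorem bcScan_aux (goal : String) :
    ∀ (l : List (String × String)) (gs : List String) (fp : List (String × String)),
      (∀ r ∈ fp, ¬ r.2 = goal) →
      l.foldl (bcStep goal) (gs, fp ++ l) =
        (gs ++ (l.filter (fun r => r.2 = goal)).map Prod.fst,
         fp ++ l.filter (fun r => ¬ r.2 = goal)) := by
  intro l
  induction l with
  | nil => intro gs fp _; simp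
  | cons r tl ih =>
      intro gs fp hfp
      by_cases hr : r.2 = goal
      · have hnm : r ∉ fp := fun hm => hfp r hm hr
        have hrm := pv_remove?_append_self fp tl r hnm
        rw [List.foldl_cons]
        have hst : bcStep goal (gs, fp ++ r :: tl) r = (gs ++ [r.1], fp ++ tl) := by
          simp [bcStep, hr, hrm]
        rw [hst, ih (gs ++ [r.1]) fp hfp]
        simp [hr]
      · rw [List.foldl_cons]
        have hst : bcStep goal (gs, fp ++ r :: tl) r = (gs, (fp ++ [r]) ++ tl) := by
          simp [bcStep, hr]
        rw [hst, ih gs (fp ++ [r])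
          (by intro x hx; rcases List.mem_append.1 hx with h | h
              · exact hfp x h
              · simp at h; subst h; exact hr)]
        simp [hr]

theorem bcScan_eq (goal : String) (rules : List (String × String)) :
    bcScan goal rules =
      ((rules.filter (fun r => r.2 = goal)).map Prod.fst,
       rules.filter (fun r => ¬ r.2 = goal)) := by
  have := bcScan_aux goal rules [] [] (by intro r h; simp at h)
  simpa [bcScan] using this

def backward_chain (beliefs : List String) (rules : List (String × String)) (goal : String) : Bool :=
  if goal = "" ∨ goal ∈ beliefs then true
  else
    -- A's second for-loop: return True on the first new_goal that chains, else False
    (bcScan goal rules).1.attach.any (fun g => backward_chain beliefs (bcScan goal rules).2 g.1)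
termination_by rules.length
decreasing_by
  obtain ⟨gv, hg⟩ := g
  rw [bcScan_eq] at hg ⊢
  simp only at hg ⊢
  obtain ⟨r, hr, _⟩ := List.mem_map.1 hg
  have hrm := List.mem_filter.1 hr
  apply List.length_filter_lt_length_iff_exists.2
  exact ⟨r, hrm.1, by simpa using hrm.2⟩

-- ===== PORT B =====
-- body of B's inner for-loop over rules
def fwStep (k : PySem.Set String) (r : String × String) : PySem.Set String :=
  if r.1 = "" ∨ r.1 ∈ k then PySem.Set.add k r.2 else k

def backward_chain_alt (beliefs : List String) (rules : List (String × String)) (goal : String) : Bool :=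
  let known := (List.range rules.length).foldl
    (fun k _ => rules.foldl fwStep k) (PySem.Set.ofList beliefs)
  goal = "" ∨ goal ∈ known

-- ===== PRECONDITION & SPEC =====
def Spec_backward_chain (beliefs : List String) (rules : List (String × String)) (goal : String) (out : Bool) : Prop := out = backward_chain_alt beliefs rules goal
instance (beliefs : List String) (rules : List (String × String)) (goal : String) (out : Bool) : Decidable (Spec_backward_chain beliefs rules goal out) := by unfold Spec_backward_chain; infer_instance

-- ===== CLAIM (what is proved, stated in full; the proofs are below) =====
def Claim_equal_backward_chain : Prop := ∀ (beliefs : List String) (rules : List (String × String)) (goal : String), Dom_backward_chain beliefs rules goal → Spec_backward_chain beliefs rules goal (backward_chain beliefs rules goal)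

-- ===== LEMMAS AND PROOFS =====

-- proof chains: a list of rules linking the goal down to "" or a belief
def ChainP (B : List String) : List (String × String) → String → Prop
  | [], g => g = "" ∨ g ∈ B
  | r :: rs, g => r.2 = g ∧ ChainP B rs r.1

-- A is sound: success yields a chain inside the rule list it was called with
theorem A_sound_aux (B : List String) :
    ∀ (n : Nat) (R : List (String × String)) (g : String), R.length ≤ n →
      backward_chain B R g = true → ∃ rs, rs ⊆ R ∧ ChainP B rs g := by
  intro n
  induction n with
  | zero =>
      intro R g hlen hA
      have hR : R = [] := List.length_eq_zero_iff.1 (Nat.le_zero.1 hlen)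
      subst hR
      rw [backward_chain.eq_def] at hA
      by_cases hb : g = "" ∨ g ∈ B
      · exact ⟨[], by simp, hb⟩
      · rw [if_neg hb] at hA
        simp [bcScan_eq] at hA
  | succ n ih =>
    intro R g hlen hA
    rw [backward_chain.eq_def] at hA
    by_cases hb : g = "" ∨ g ∈ B
    · exact ⟨[], by simp, hb⟩
    · rw [if_neg hb] at hA
      simp only [List.any_eq_true] at hA
      obtain ⟨⟨g', hg'⟩, _, hrec⟩ := hA
      rw [bcScan_eq] at hg'
      simp only at hg'
      replace hrec : backward_chain B (R.filter (fun r => ¬ r.2 = g)) g' = true := by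
        have h2 : (bcScan g R).2 = R.filter (fun r => ¬ r.2 = g) := by rw [bcScan_eq]
        rw [h2] at hrec; exact hrec
      have hlt : (R.filter (fun r => ¬ r.2 = g)).length < R.length := by
        obtain ⟨r, hr, _⟩ := List.mem_map.1 hg'
        have := List.mem_filter.1 hr
        apply List.length_filter_lt_length_iff_exists.2
        exact ⟨r, this.1, by simpa using this.2⟩
      obtain ⟨rs, hsub, hch⟩ := ih _ g' (by omega) hrec
      obtain ⟨r, hr, hfst⟩ := List.mem_map.1 hg'
      have hrm := List.mem_filter.1 hr
      have hsnd : r.2 = g := by simpa using hrm.2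
      refine ⟨(g', g) :: rs, ?_, rfl, ?_⟩
      · intro x hx
        rcases List.mem_cons.1 hx with h | h
        · subst h
          have hreq : r = (g', g) := by
            cases r; simp at hfst hsnd; simp [hfst, hsnd]
          rw [← hreq]; exact hrm.1
        · exact List.mem_of_mem_filter (hsub h)
      · simpa [hfst] using hch

-- A is complete on chains whose consequents are all distinct
theorem A_complete (B : List String) :
    ∀ (rs : List (String × String)) (R : List (String × String)) (g : String),
      rs ⊆ R → ChainP B rs g → (rs.map Prod.snd).Nodup →
      backward_chain B R g = true := by
  intro rs
  induction rs with
  | nil =>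
      intro R g _ hch _
      have hb : g = "" ∨ g ∈ B := hch
      rw [backward_chain.eq_def, if_pos hb]
  | cons r tl ih =>
      intro R g hsub hch hnd
      obtain ⟨hsnd, htl⟩ := hch
      rw [backward_chain.eq_def]
      by_cases hb : g = "" ∨ g ∈ B
      · rw [if_pos hb]
      · rw [if_neg hb]
        simp only [List.any_eq_true]
        have hmem : r.1 ∈ (bcScan g R).1 := by
          rw [bcScan_eq]
          exact List.mem_map.2 ⟨r, List.mem_filter.2
            ⟨hsub (List.mem_cons_self), by simpa using hsnd⟩, rfl⟩
        refine ⟨⟨r.1, hmem⟩, List.mem_attach _ _, ?_⟩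
        simp only [List.map_cons, List.nodup_cons] at hnd
        apply ih
        · intro x hx
          rw [bcScan_eq]
          refine List.mem_filter.2 ⟨hsub (List.mem_cons_of_mem _ hx), ?_⟩
          simp only [decide_eq_true_eq]
          intro hxg
          apply hnd.1
          rw [hsnd, ← hxg]
          exact List.mem_map.2 ⟨x, hx, rfl⟩
        · exact htl
        · exact hnd.2

-- a tail of a chain is a chain for the consequent of its head rule
theorem chain_suffix (B : List String) :
    ∀ (u : List (String × String)) (r : String × String) (v : List (String × String)) (x : String),
      ChainP B (u ++ r :: v) x → ChainP B (r :: v) r.2 := by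
  intro u
  induction u with
  | nil => intro r v x h; exact ⟨rfl, h.2⟩
  | cons y u ih => intro r v x h; exact ih r v y.1 h.2

-- every chain can be thinned to one with pairwise-distinct consequents
theorem chain_shorten (B : List String) :
    ∀ (rs : List (String × String)) (g : String), ChainP B rs g →
      ∃ rs', rs' ⊆ rs ∧ rs'.length ≤ rs.length ∧ ChainP B rs' g ∧ (rs'.map Prod.snd).Nodup := by
  intro rs
  induction rs with
  | nil => intro g h; exact ⟨[], by simp, by simp, h, by simp⟩
  | cons r tl ih =>
      intro g hch
      obtain ⟨hsnd, htl⟩ := hch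
      obtain ⟨tl', hsub, hlen, hch', hnd⟩ := ih r.1 htl
      by_cases hg : g ∈ tl'.map Prod.snd
      · obtain ⟨r', hr', hr'snd⟩ := List.mem_map.1 hg
        obtain ⟨u, v, huv⟩ := List.append_of_mem hr'
        rw [huv] at hch' hsub hnd hlen
        have hsuf := chain_suffix B u r' v r.1 hch'
        refine ⟨r' :: v, ?_, ?_, ?_, ?_⟩
        · intro x hx
          exact List.mem_cons_of_mem _ (hsub (List.mem_append_right u hx))
        · have h1 : (r' :: v).length ≤ (u ++ r' :: v).length := by
            simp only [List.length_append, List.length_cons]; omega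
          calc (r' :: v).length ≤ (u ++ r' :: v).length := h1
            _ ≤ tl.length := hlen
            _ ≤ (r :: tl).length := by simp
        · rw [hr'snd] at hsuf; exact hsuf
        · have hsl : ((r' :: v).map Prod.snd).Sublist ((u ++ r' :: v).map Prod.snd) := by
            simp only [List.map_append]
            exact (List.sublist_append_right _ _)
          exact hsl.nodup hnd
      · refine ⟨r :: tl', ?_, by simpa using hlen, ⟨hsnd, hch'⟩, ?_⟩
        · intro x hx
          rcases List.mem_cons.1 hx with h | h
          · subst h; simp
          · exact List.mem_cons_of_mem _ (hsub h)
        · simp only [List.map_cons, List.nodup_cons]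
          exact ⟨by rw [hsnd]; exact hg, hnd⟩

-- the saturation state of B after n rounds
def knownN (B : List String) (R : List (String × String)) : Nat → PySem.Set String
  | 0 => PySem.Set.ofList B
  | n + 1 => R.foldl fwStep (knownN B R n)

theorem knownN_eq_range (B : List String) (R : List (String × String)) (n : Nat) :
    (List.range n).foldl (fun k _ => R.foldl fwStep k) (PySem.Set.ofList B) = knownN B R n := by
  induction n with
  | zero => rfl
  | succ n ih => rw [List.range_succ, List.foldl_append, ih]; rfl

theorem mem_fwStep (k : PySem.Set String) (r : String × String) (x : String)
    (h : x ∈ k) : x ∈ fwStep k r := by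
  unfold fwStep
  split
  · exact (PySem.Set.mem_add _ _ _).2 (Or.inl h)
  · exact h

theorem mem_foldl_fwStep (l : List (String × String)) (k : PySem.Set String) (x : String)
    (h : x ∈ k) : x ∈ l.foldl fwStep k := by
  induction l generalizing k with
  | nil => exact h
  | cons r tl ih => exact ih _ (mem_fwStep k r x h)

theorem foldl_fwStep_adds (l : List (String × String)) (k : PySem.Set String)
    (r : String × String) (hr : r ∈ l) (hc : r.1 = "" ∨ r.1 ∈ k) :
    r.2 ∈ l.foldl fwStep k := by
  induction l generalizing k with
  | nil => cases hr
  | cons h tl ih =>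
      rw [List.foldl_cons]
      rcases List.mem_cons.1 hr with he | hm
      · subst he
        apply mem_foldl_fwStep
        unfold fwStep
        rw [if_pos hc]
        exact (PySem.Set.mem_add _ _ _).2 (Or.inr rfl)
      · refine ih _ hm ?_
        rcases hc with h1 | h1
        · exact Or.inl h1
        · exact Or.inr (mem_fwStep _ _ _ h1)

theorem knownN_add (B : List String) (R : List (String × String)) (n k : Nat)
    (x : String) (h : x ∈ knownN B R n) : x ∈ knownN B R (n + k) := by
  induction k with
  | zero => exact h
  | succ k ih => exact mem_foldl_fwStep R _ x ih

theorem knownN_mono (B : List String) (R : List (String × String)) (n m : Nat)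
    (hnm : n ≤ m) (x : String) (h : x ∈ knownN B R n) : x ∈ knownN B R m := by
  obtain ⟨k, rfl⟩ := Nat.exists_eq_add_of_le hnm
  exact knownN_add B R n k x h

-- B is complete: a chain of length ≤ n puts its goal into the n-round saturation (or goal = "")
theorem B_complete (B : List String) (R : List (String × String)) :
    ∀ (rs : List (String × String)) (g : String) (n : Nat),
      rs ⊆ R → ChainP B rs g → rs.length ≤ n →
      g = "" ∨ g ∈ knownN B R n := by
  intro rs
  induction rs with
  | nil =>
      intro g n _ hch _
      rcases hch with h | h
      · exact Or.inl h
      · exact Or.inr (knownN_mono B R 0 n (Nat.zero_le n) g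
          (by simpa [knownN, PySem.Set.mem_ofList] using h))
  | cons r tl ih =>
      intro g n hsub hch hlen
      obtain ⟨hsnd, htl⟩ := hch
      cases n with
      | zero => simp at hlen
      | succ m =>
          have hc := ih r.1 m (fun x hx => hsub (List.mem_cons_of_mem _ hx)) htl (by simpa using hlen)
          right
          rw [← hsnd]
          show r.2 ∈ knownN B R (m+1)
          exact foldl_fwStep_adds R (knownN B R m) r (hsub List.mem_cons_self)
            (by rcases hc with h | h
                · exact Or.inl h
                · exact Or.inr h)

-- B is sound: every saturated fact has a chain
theorem foldl_fwStep_sound (B : List String) (R : List (String × String))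
    (l : List (String × String)) (hl : l ⊆ R) (k : PySem.Set String)
    (hk : ∀ x ∈ k, ∃ rs, rs ⊆ R ∧ ChainP B rs x) :
    ∀ x ∈ l.foldl fwStep k, ∃ rs, rs ⊆ R ∧ ChainP B rs x := by
  induction l generalizing k with
  | nil => exact hk
  | cons r tl ih =>
      apply ih (fun y hy => hl (List.mem_cons_of_mem _ hy))
      intro x hx
      have hrR : r ∈ R := hl List.mem_cons_self
      unfold fwStep at hx
      split at hx
      · rename_i hcond
        rcases (PySem.Set.mem_add _ _ _).1 hx with h | h
        · exact hk x h
        · subst h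
          rcases hcond with h1 | h1
          · refine ⟨[r], ?_, rfl, Or.inl h1⟩
            intro y hy
            have : y = r := by simpa using hy
            rw [this]; exact hrR
          · obtain ⟨rs, hsub, hch⟩ := hk r.1 h1
            refine ⟨r :: rs, ?_, rfl, hch⟩
            intro y hy
            rcases List.mem_cons.1 hy with h2 | h2
            · rw [h2]; exact hrR
            · exact hsub h2
      · exact hk x hx

theorem knownN_sound (B : List String) (R : List (String × String)) (n : Nat) :
    ∀ x ∈ knownN B R n, ∃ rs, rs ⊆ R ∧ ChainP B rs x := by
  induction n with
  | zero =>
      intro x hx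
      exact ⟨[], by simp, Or.inr (by simpa [knownN, PySem.Set.mem_ofList] using hx)⟩
  | succ n ih => exact foldl_fwStep_sound B R R (fun _ h => h) _ ih

theorem nodup_chain_length_le (R rs : List (String × String))
    (hsub : rs ⊆ R) (hnd : (rs.map Prod.snd).Nodup) : rs.length ≤ R.length := by
  have hnd' : rs.Nodup := hnd.of_map
  calc rs.length = rs.toFinset.card := (List.toFinset_card_of_nodup hnd').symm
    _ ≤ R.toFinset.card := Finset.card_le_card (by
        intro x hx
        exact List.mem_toFinset.2 (hsub (List.mem_toFinset.1 hx)))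
    _ ≤ R.length := List.toFinset_card_le R

theorem A_iff (B : List String) (R : List (String × String)) (g : String) :
    backward_chain B R g = true ↔ ∃ rs, rs ⊆ R ∧ ChainP B rs g := by
  constructor
  · exact A_sound_aux B R.length R g (Nat.le_refl _)
  · rintro ⟨rs, hsub, hch⟩
    obtain ⟨rs', hsub', _, hch', hnd⟩ := chain_shorten B rs g hch
    exact A_complete B rs' R g (fun x hx => hsub (hsub' hx)) hch' hnd

theorem B_iff (B : List String) (R : List (String × String)) (g : String) :
    backward_chain_alt B R g = true ↔ ∃ rs, rs ⊆ R ∧ ChainP B rs g := by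
  unfold backward_chain_alt
  rw [knownN_eq_range]
  simp only [decide_eq_true_eq]
  constructor
  · intro h
    rcases h with h | h
    · exact ⟨[], by simp, Or.inl h⟩
    · exact knownN_sound B R R.length g h
  · rintro ⟨rs, hsub, hch⟩
    obtain ⟨rs', hsub', _, hch', hnd⟩ := chain_shorten B rs g hch
    have hsub'' : rs' ⊆ R := fun x hx => hsub (hsub' hx)
    have hlen := nodup_chain_length_le R rs' hsub'' hnd
    rcases B_complete B R rs' g R.length hsub'' hch' hlen with h | h
    · exact Or.inl h
    · exact Or.inr h

-- ===== VERDICT (by name: the statement is the Claim_ definition above) =====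
theorem backward_chain_spec : Claim_equal_backward_chain := by
  intro beliefs rules goal _
  unfold Spec_backward_chain
  rw [Bool.eq_iff_iff, A_iff, B_iff]
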